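-- pv_equiv track=rewrite | github.com/IDNI/tau-testnet | tau_native.py | _strip_nonliteral_hash_comments
-- ===== SOURCE A (Python) =====
-- def _strip_nonliteral_hash_comments(line: str) -> str:
--     """
--     Strip hash comments while preserving Tau bitvector literals.
--
--     Tau formulas use '#b...' and '#x...' literals; those hashes must remain.
--     Any other '#' sequence is treated as a comment start until end-of-line.
--     """
--     out = []
--     i = 0
--     while i < len(line):
--         ch = line[i]
--         if ch != "#":
--             out.append(ch)
--             i += 1
--             continue
--
--         nxt = line[i + 1] if i + 1 < len(line) else ""
--         if nxt.lower() in ("b", "x"):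
--             out.append(ch)
--             i += 1
--             continue
--
--         # Regular comment marker: ignore the remainder of this line.
--         break
--     return "".join(out)
-- ===== SOURCE B (Python) =====
-- def _strip_nonliteral_hash_comments(line: str) -> str:
--     pos = 0
--     while True:
--         j = line.find('#', pos)
--         if j == -1:
--             return line
--         if line[j+1:j+2].lower() in ('b', 'x'):
--             pos = j + 1
--         else:
--             return line[:j]
-- ===== Notes on version B (the rewrite author's own statement) =====
-- stated objective: faster
-- what changed: B jumps between hash positions with str.find and returns a slice of the original line, instead of A's character-by-character while loop with an output accumulator.
import Mathlib
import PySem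

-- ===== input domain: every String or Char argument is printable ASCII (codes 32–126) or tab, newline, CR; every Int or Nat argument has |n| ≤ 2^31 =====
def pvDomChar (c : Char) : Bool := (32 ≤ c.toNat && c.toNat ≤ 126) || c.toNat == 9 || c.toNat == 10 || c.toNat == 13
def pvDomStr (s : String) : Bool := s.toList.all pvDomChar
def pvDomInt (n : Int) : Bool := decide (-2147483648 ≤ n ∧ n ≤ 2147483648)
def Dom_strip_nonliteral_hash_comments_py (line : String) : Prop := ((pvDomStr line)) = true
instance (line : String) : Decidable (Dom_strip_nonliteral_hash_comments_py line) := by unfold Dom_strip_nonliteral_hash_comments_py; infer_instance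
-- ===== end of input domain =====

-- B replaces A's character-by-character accumulator loop with str.find jumps between
-- hash positions and returns a slice of the original line (objective: faster, constant-factor).


-- ===== PORT A =====
-- A's while loop over characters: append non-'#' chars, keep '#' when the next
-- char lowercases to 'b'/'x', otherwise break (drop the rest of the line).
def stripGoA : List Char → List Char
  | [] => []
  | ch :: rest =>
    if ch ≠ '#' then ch :: stripGoA rest
    else
      match rest with
      | nxt :: _ =>
        if nxt.toLower = 'b' ∨ nxt.toLower = 'x' then ch :: stripGoA rest
        else []
      | [] => []   -- end of line after the hash: the lookahead test fails, so A breaks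

def strip_nonliteral_hash_comments_py (line : String) : String :=
  String.ofList (stripGoA line.toList)

-- ===== PORT B =====
-- line.find('#', pos): index of the first '#' at position ≥ pos, none if absent.
def stripFindHash : List Char → Option Nat
  | [] => none
  | c :: r => if c = '#' then some 0 else (stripFindHash r).map (· + 1)

-- B's loop: jump to the next '#'; keep scanning past literal hashes, else slice.
def stripGoB (l : List Char) (pos : Nat) : List Char :=
  match h : (stripFindHash (l.drop pos)).map (pos + ·) with
  | none => l
  | some j =>
    -- line[j+1:j+2].lower() in ('b','x')
    match l.drop (j + 1) with
    | nxt :: _ =>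
      if nxt.toLower = 'b' ∨ nxt.toLower = 'x' then stripGoB l (j + 1)
      else l.take j
    | [] => l.take j
termination_by l.length - pos
decreasing_by
  have hd : l.drop pos ≠ [] := by
    intro hnil; rw [hnil] at h; simp [stripFindHash] at h
  have hpos : pos < l.length := by
    by_contra hle
    exact hd (List.drop_eq_nil_of_le (by omega))
  have hj : pos ≤ j := by
    cases hk : stripFindHash (l.drop pos) with
    | none => rw [hk] at h; simp at h
    | some k => rw [hk] at h; simp at h; omega
  omega

def strip_nonliteral_hash_comments_py_alt (line : String) : String :=
  String.ofList (stripGoB line.toList 0)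

-- ===== PRECONDITION & SPEC =====
def Spec_strip_nonliteral_hash_comments_py (line : String) (out : String) : Prop := out = strip_nonliteral_hash_comments_py_alt line
instance (line : String) (out : String) : Decidable (Spec_strip_nonliteral_hash_comments_py line out) := by unfold Spec_strip_nonliteral_hash_comments_py; infer_instance

-- ===== CLAIM (what is proved, stated in full; the proofs are below) =====
def Claim_equal_strip_nonliteral_hash_comments_py : Prop := ∀ (line : String), Dom_strip_nonliteral_hash_comments_py line → Spec_strip_nonliteral_hash_comments_py line (strip_nonliteral_hash_comments_py line)

-- ===== LEMMAS AND PROOFS =====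

theorem stripFindHash_none {l : List Char} (h : stripFindHash l = none) : '#' ∉ l := by
  induction l with
  | nil => simp
  | cons c r ih =>
    by_cases hc : c = '#'
    · simp [stripFindHash, hc] at h
    · simp [stripFindHash, hc] at h
      simp [List.mem_cons]
      exact ⟨fun he => hc he.symm, ih h⟩

theorem stripFindHash_some {l : List Char} {k : Nat} (h : stripFindHash l = some k) :
    ∃ pre rest, l = pre ++ '#' :: rest ∧ pre.length = k ∧ '#' ∉ pre := by
  induction l generalizing k with
  | nil => simp [stripFindHash] at h
  | cons c r ih =>
    by_cases hc : c = '#'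
    · subst hc
      simp [stripFindHash] at h
      exact ⟨[], r, by simp [← h]⟩
    · simp [stripFindHash, hc] at h
      cases hk : stripFindHash r with
      | none => rw [hk] at h; simp at h
      | some k' =>
        rw [hk] at h; simp at h
        obtain ⟨pre, rest, hl, hlen, hmem⟩ := ih hk
        refine ⟨c :: pre, rest, by simp [hl], by simp [hlen, h], ?_⟩
        simp [List.mem_cons]
        exact ⟨fun he => hc he.symm, hmem⟩

theorem stripGoA_no_hash {l : List Char} (h : '#' ∉ l) : stripGoA l = l := by
  induction l with
  | nil => rfl
  | cons c r ih =>
    simp [List.mem_cons, not_or] at h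
    have hc : c ≠ '#' := fun he => h.1 he.symm
    simp only [stripGoA]
    rw [if_pos hc, ih h.2]

theorem stripGoA_append {pre m : List Char} (h : '#' ∉ pre) :
    stripGoA (pre ++ m) = pre ++ stripGoA m := by
  induction pre with
  | nil => simp
  | cons c r ih =>
    simp [List.mem_cons, not_or] at h
    have hc : c ≠ '#' := fun he => h.1 he.symm
    rw [List.cons_append]
    simp only [stripGoA]
    rw [if_pos hc, ih h.2, List.cons_append]

theorem stripGoB_eq (l : List Char) (pos : Nat) :
    stripGoB l pos = l.take pos ++ stripGoA (l.drop pos) := by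
  rw [stripGoB]
  cases hk : stripFindHash (l.drop pos) with
  | none =>
    simp only [Option.map_none]
    rw [stripGoA_no_hash (stripFindHash_none hk), List.take_append_drop]
  | some k =>
    simp only [Option.map_some]
    obtain ⟨pre, rest, hl, hlen, hmem⟩ := stripFindHash_some hk
    have hdrop1 : l.drop (pos + k + 1) = rest := by
      have h1 : l.drop (pos + k + 1) = (l.drop pos).drop (k + 1) := by
        rw [List.drop_drop]; ring_nf
      rw [h1, hl, ← hlen,
        show pre.length + 1 = (pre ++ ['#']).length by simp,
        show pre ++ '#' :: rest = (pre ++ ['#']) ++ rest by simp]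
      exact List.drop_left
    have htake1 : l.take (pos + k + 1) = l.take pos ++ pre ++ ['#'] := by
      rw [show pos + k + 1 = pos + (k + 1) from by omega, List.take_add, hl, ← hlen,
        show pre.length + 1 = (pre ++ ['#']).length by simp,
        show pre ++ '#' :: rest = (pre ++ ['#']) ++ rest by simp,
        List.take_left, List.append_assoc]
    have htake0 : l.take (pos + k) = l.take pos ++ pre := by
      rw [List.take_add, hl, ← hlen, List.take_left]
    have hgoA : stripGoA (l.drop pos) = pre ++ stripGoA ('#' :: rest) := by
      rw [hl]; exact stripGoA_append hmem
    rw [hdrop1, hgoA]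
    cases rest with
    | nil =>
      simp [stripGoA, htake0]
    | cons nxt r' =>
      by_cases hbx : nxt.toLower = 'b' ∨ nxt.toLower = 'x'
      · simp only [hbx, if_true]
        rw [stripGoB_eq l (pos + k + 1), hdrop1, htake1]
        simp [stripGoA, hbx]
      · simp only [hbx, if_false]
        rw [htake0]
        simp [stripGoA, hbx]
termination_by l.length - pos
decreasing_by
  have hd : l.drop pos ≠ [] := by
    intro hnil; rw [hnil] at hk; simp [stripFindHash] at hk
  have hpos : pos < l.length := by
    by_contra hle
    exact hd (List.drop_eq_nil_of_le (by omega))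
  omega

-- ===== VERDICT (by name: the statement is the Claim_ definition above) =====
theorem strip_nonliteral_hash_comments_py_spec : Claim_equal_strip_nonliteral_hash_comments_py := by
  intro line _
  unfold Spec_strip_nonliteral_hash_comments_py
  unfold strip_nonliteral_hash_comments_py strip_nonliteral_hash_comments_py_alt
  rw [stripGoB_eq]
  simp
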